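-- pv_equiv track=rewrite | github.com/HireathGames/BattleShip | Main.py | destruction_check
-- ===== SOURCE A (Python) =====
-- def destruction_check(grid):
--     updated_grid = grid
--     points = {}
--     for rows in updated_grid:
--         for pos in rows:
--             if pos[0] in points.keys():
--                 points[pos[0]][0] += 1
--                 if (pos[1]>0):
--                     points[pos[0]][1] += 1
--             else:
--                 if (pos[1]>0):
--                     points[pos[0]] = [1, 1]
--                 else:
--                     points[pos[0]] = [1, 0]
--     for key in points:
--         if points[key][0] == points[key][1]:
--             for row_ind in range(0, len(updated_grid)):
--                 for pos_ind in range(0, len(updated_grid[row_ind])):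
--                     if updated_grid[row_ind][pos_ind][0] == key:
--                         updated_grid[row_ind][pos_ind][1] = -2
--     return(updated_grid)
-- ===== SOURCE B (Python) =====
-- def destruction_check(grid):
--     # Set-based rewrite: a ship id is dead iff it never occurs with an unhit cell.
--     # NOTE: A mutates grid in place and returns it; B builds a fresh grid (return value identical).
--     unhit = {pos[0] for row in grid for pos in row if pos[1] <= 0}
--     dead = {pos[0] for row in grid for pos in row} - unhit
--     return [[pos[:1] + [-2] + pos[2:] if pos[0] in dead else pos
--              for pos in row] for row in grid]
-- ===== Notes on version B (the rewrite author's own statement) =====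
-- stated objective: faster
-- what changed: A tallies [count,hits] per ship id in a dict and then rescans the whole grid once per fully-hit id (O(K*N)); B builds two sets in one comprehension pass (ids seen, ids seen unhit), takes their difference as the dead ids, and rewrites the grid in a single pass (O(N)); B returns a fresh grid instead of mutating in place (same return value).
import Mathlib
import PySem

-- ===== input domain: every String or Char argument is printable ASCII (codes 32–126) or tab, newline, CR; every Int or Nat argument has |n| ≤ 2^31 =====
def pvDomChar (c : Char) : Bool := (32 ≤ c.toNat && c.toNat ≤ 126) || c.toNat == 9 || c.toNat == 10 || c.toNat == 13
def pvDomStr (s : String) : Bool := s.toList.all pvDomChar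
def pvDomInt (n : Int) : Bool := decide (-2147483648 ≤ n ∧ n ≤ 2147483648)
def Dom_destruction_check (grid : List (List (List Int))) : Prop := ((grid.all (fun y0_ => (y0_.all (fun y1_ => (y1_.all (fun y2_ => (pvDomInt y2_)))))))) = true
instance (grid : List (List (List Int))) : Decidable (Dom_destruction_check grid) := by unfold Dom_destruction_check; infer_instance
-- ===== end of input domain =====

-- B replaces A's per-id rescans by a set difference and one rewrite pass; A mutates the grid in
-- place and returns it, B returns an equal fresh grid (the equivalence is about the return value).

-- ===== PORT A =====
-- dict value = the Python list [count, hits] as a pair (count, hits)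
def dcStep (pts : PySem.Dict Int (Int × Int)) (pos : List Int) : PySem.Dict Int (Int × Int) :=
  match pts.get? (PySem.List.pyGetD pos 0 0) with
  | some ch =>
      pts.insert (PySem.List.pyGetD pos 0 0)
        (ch.1 + 1, if 0 < PySem.List.pyGetD pos 1 0 then ch.2 + 1 else ch.2)
  | none =>
      pts.insert (PySem.List.pyGetD pos 0 0)
        (1, if 0 < PySem.List.pyGetD pos 1 0 then 1 else 0)

-- the two index loops write cell (row_ind, pos_ind) from that cell's own value only,
-- so they are the pointwise map over the grid
def dcMark (g : List (List (List Int))) (key : Int) : List (List (List Int)) :=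
  g.map (fun row => row.map (fun pos =>
    if PySem.List.pyGetD pos 0 0 == key then PySem.List.pySetD pos 1 (-2) else pos))

def destruction_check (grid : List (List (List Int))) : List (List (List Int)) :=
  let points := grid.foldl (fun pts rows => rows.foldl dcStep pts) PySem.Dict.empty
  -- 'for key in points' iterates keys in insertion order; keys are unique, so points[key] is kv.2
  points.items.foldl (fun g kv => if kv.2.1 == kv.2.2 then dcMark g kv.1 else g) grid

-- ===== PORT B =====
def destruction_check_alt (grid : List (List (List Int))) : List (List (List Int)) :=
  let unhit : PySem.Set Int := PySem.Set.ofList (grid.flatMap (fun row =>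
    (row.filter (fun pos => PySem.List.pyGetD pos 1 0 ≤ 0)).map (fun pos => PySem.List.pyGetD pos 0 0)))
  let dead : PySem.Set Int := PySem.Set.diff
    (PySem.Set.ofList (grid.flatMap (fun row => row.map (fun pos => PySem.List.pyGetD pos 0 0)))) unhit
  grid.map (fun row => row.map (fun pos =>
    if PySem.Set.contains dead (PySem.List.pyGetD pos 0 0) then
      PySem.List.slice pos none (some 1) ++ [-2] ++ PySem.List.slice pos (some 2) none
    else pos))

-- ===== PRECONDITION & SPEC =====
-- Pre_ excludes exactly the inputs where the Python A raises IndexError: a cell with fewer than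
-- two entries (A reads pos[0] and pos[1] of every cell).
def Pre_destruction_check (grid : List (List (List Int))) : Prop :=
  ∀ row ∈ grid, ∀ pos ∈ row, 2 ≤ pos.length
instance (grid : List (List (List Int))) : Decidable (Pre_destruction_check grid) := by
  unfold Pre_destruction_check; infer_instance
def pvWitness_destruction_check : List (List (List Int)) := [[[1, 2], [2, 0]], [[1, 3]]]

def Spec_destruction_check (grid : List (List (List Int))) (out : List (List (List Int))) : Prop :=
  out = destruction_check_alt grid
instance (grid : List (List (List Int))) (out : List (List (List Int))) :
    Decidable (Spec_destruction_check grid out) := by unfold Spec_destruction_check; infer_instance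

-- ===== CLAIM (what is proved, stated in full; the proofs are below) =====
def Claim_equal_destruction_check : Prop := ∀ (grid : List (List (List Int))),
  Dom_destruction_check grid → Pre_destruction_check grid →
  Spec_destruction_check grid (destruction_check grid)

-- ===== LEMMAS AND PROOFS =====

def cid (p : List Int) : Int := PySem.List.pyGetD p 0 0

def dcVal (d : PySem.Dict Int (Int × Int)) (p : List Int) : Int × Int :=
  match d.get? (PySem.List.pyGetD p 0 0) with
  | some ch => (ch.1 + 1, if 0 < PySem.List.pyGetD p 1 0 then ch.2 + 1 else ch.2)
  | none => (1, if 0 < PySem.List.pyGetD p 1 0 then 1 else 0)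

theorem dcStep_eq : dcStep = fun d p => d.insert (cid p) (dcVal d p) := by
  funext d p
  unfold dcStep dcVal cid
  cases h : d.get? (PySem.List.pyGetD p 0 0) <;> simp

theorem foldl_foldl {α δ : Type} (g : List (List α)) (f : δ → α → δ) (d : δ) :
    g.foldl (fun d r => r.foldl f d) d = (g.flatMap (fun r => r)).foldl f d := by
  induction g generalizing d with
  | nil => rfl
  | cons r g ih => simp [List.foldl_append, ih]

theorem dcStep_getD (d : PySem.Dict Int (Int × Int)) (p : List Int) (k : Int) :
    (dcStep d p).getD k (0, 0) =
      ((d.getD k (0, 0)).1 + (if cid p == k then 1 else 0),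
       (d.getD k (0, 0)).2 +
        (if cid p == k && decide (0 < PySem.List.pyGetD p 1 0) then 1 else 0)) := by
  unfold dcStep
  cases h : d.get? (PySem.List.pyGetD p 0 0) with
  | none =>
    rw [PySem.Dict.getD_insert]
    by_cases hk : k = PySem.List.pyGetD p 0 0
    · subst hk
      rw [if_pos rfl, PySem.Dict.getD_of_get?_eq_none _ _ h]
      simp only [cid, BEq.rfl, Bool.true_and]
      split <;> simp_all
    · rw [if_neg hk]
      have hb : (cid p == k) = false := by
        simp only [cid, beq_eq_false_iff_ne]; exact fun hc => hk hc.symm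
      simp [hb]
  | some ch =>
    rw [PySem.Dict.getD_insert]
    by_cases hk : k = PySem.List.pyGetD p 0 0
    · subst hk
      rw [if_pos rfl, PySem.Dict.getD_of_get?_eq_some _ _ h]
      simp only [cid, BEq.rfl, Bool.true_and]
      split <;> simp_all
    · rw [if_neg hk]
      have hb : (cid p == k) = false := by
        simp only [cid, beq_eq_false_iff_ne]; exact fun hc => hk hc.symm
      simp [hb]

theorem pass1_getD (l : List (List Int)) (d : PySem.Dict Int (Int × Int)) (k : Int) :
    (l.foldl dcStep d).getD k (0, 0) =
      ((d.getD k (0, 0)).1 + (l.countP (fun p => cid p == k) : Int),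
       (d.getD k (0, 0)).2 +
        (l.countP (fun p => cid p == k && decide (0 < PySem.List.pyGetD p 1 0)) : Int)) := by
  induction l generalizing d with
  | nil => simp
  | cons p l ih =>
    simp only [List.foldl_cons, ih, dcStep_getD, List.countP_cons]
    simp only [Prod.mk.injEq]
    constructor <;> (push_cast; split <;> ring)

theorem pass1_keys_nodup (l : List (List Int)) :
    (l.foldl dcStep PySem.Dict.empty).keys.Nodup := by
  rw [dcStep_eq]
  exact PySem.Dict.nodup_keys_foldl_insert_key l cid dcVal PySem.Dict.empty
    (by simp)

theorem pass1_mem_keys (l : List (List Int)) (k : Int) :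
    k ∈ (l.foldl dcStep PySem.Dict.empty).keys ↔ ∃ p ∈ l, cid p = k := by
  rw [dcStep_eq, PySem.Dict.keys_foldl_insert_key]
  simp [PySem.Set.mem_update, PySem.Dict.keys_empty, eq_comm]

theorem foldl_ite_filter {β γ : Type} (L : List β) (P : β → Bool) (h : β → Int)
    (f : γ → Int → γ) (g : γ) :
    L.foldl (fun g x => if P x then f g (h x) else g) g = ((L.filter P).map h).foldl f g := by
  induction L generalizing g with
  | nil => rfl
  | cons x L ih => by_cases hx : P x <;> simp [hx, ih]

theorem pySetD_one (p : List Int) : PySem.List.pySetD p 1 (-2) = p.set 1 (-2) := by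
  rw [PySem.List.pySetD_of_nonneg p (-2) (by norm_num)]; norm_num

theorem cid_set (p : List Int) :
    PySem.List.pyGetD (PySem.List.pySetD p 1 (-2)) 0 0 = PySem.List.pyGetD p 0 0 := by
  rw [pySetD_one]
  cases p with
  | nil => rfl
  | cons a t => cases t <;> simp [List.set, PySem.List.pyGetD_zero_cons]

theorem set_idem (p : List Int) :
    PySem.List.pySetD (PySem.List.pySetD p 1 (-2)) 1 (-2) = PySem.List.pySetD p 1 (-2) := by
  rw [pySetD_one, pySetD_one, List.set_set]

theorem mark_foldl (L : List Int) (g : List (List (List Int))) :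
    L.foldl dcMark g = g.map (fun row => row.map (fun p =>
      if L.any (fun k => cid p == k) then PySem.List.pySetD p 1 (-2) else p)) := by
  induction L generalizing g with
  | nil =>
    simp
  | cons k L ih =>
    rw [List.foldl_cons, ih]
    unfold dcMark
    simp only [List.map_map]
    apply List.map_congr_left; intro row _
    simp only [Function.comp, List.map_map]
    apply List.map_congr_left; intro p _
    simp only [cid, List.any_beq, beq_iff_eq]
    by_cases hk : PySem.List.pyGetD p 0 0 = k <;>
      by_cases hm : PySem.List.pyGetD p 0 0 ∈ L <;>
        simp [hk, hm, cid_set, set_idem]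

theorem set_eq_splice (p : List Int) (hp : 2 ≤ p.length) :
    PySem.List.pySetD p 1 (-2) =
      PySem.List.slice p none (some 1) ++ [-2] ++ PySem.List.slice p (some 2) none := by
  rw [pySetD_one]
  match p, hp with
  | a :: b :: t, _ =>
    rw [PySem.List.slice_to _ (by norm_num), PySem.List.slice_from _ (by norm_num)]
    rfl

theorem count_eq_iff (l : List (List Int)) (k : Int) :
    ((l.countP (fun p => cid p == k) : Int) =
      (l.countP (fun p => cid p == k && decide (0 < PySem.List.pyGetD p 1 0)) : Int)) ↔
    ∀ p ∈ l, cid p = k → 0 < PySem.List.pyGetD p 1 0 := by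
  rw [Int.natCast_inj]
  have h1 : l.countP (fun p => cid p == k && decide (0 < PySem.List.pyGetD p 1 0))
      = (l.filter (fun p => cid p == k)).countP (fun p => decide (0 < PySem.List.pyGetD p 1 0)) := by
    rw [List.countP_filter]
    apply List.countP_congr
    intro p _; simp [Bool.and_comm]
  have h2 : l.countP (fun p => cid p == k) = (l.filter (fun p => cid p == k)).length :=
    List.countP_eq_length_filter
  rw [h1, h2, eq_comm, List.countP_eq_length]
  constructor
  · intro h p hp hk
    have := h p (by rw [List.mem_filter]; exact ⟨hp, by simp [hk]⟩)
    simpa using this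
  · intro h p hp
    rw [List.mem_filter] at hp
    simpa using h p hp.1 (by simpa using hp.2)

-- ===== VERDICT (by name: the statement is the Claim_ definition above) =====
theorem destruction_check_spec : Claim_equal_destruction_check := by
  intro grid _ hpre
  unfold Spec_destruction_check destruction_check destruction_check_alt
  set cells := grid.flatMap (fun r => r) with hcells
  rw [foldl_foldl, foldl_ite_filter]
  set pts := cells.foldl dcStep PySem.Dict.empty with hpts
  rw [mark_foldl]
  apply List.map_congr_left; intro row hrow
  apply List.map_congr_left; intro p hp
  have hpcell : p ∈ cells := by
    rw [hcells, List.mem_flatMap]; exact ⟨row, hrow, hp⟩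
  have hplen : 2 ≤ p.length := hpre row hrow p hp
  -- membership in A's dead-key list
  have hmemA : ((pts.items.filter (fun kv => kv.2.1 == kv.2.2)).map (·.1)).any
        (fun k => cid p == k) = true ↔
      (pts.getD (cid p) (0,0)).1 = (pts.getD (cid p) (0,0)).2 := by
    constructor
    · rintro h
      simp only [List.any_eq_true, List.mem_map, List.mem_filter] at h
      obtain ⟨k, ⟨⟨kk, vv⟩, ⟨hmem, hvv⟩, hk1⟩, hk2⟩ := h
      simp only at hk1
      rw [beq_iff_eq] at hk2 hvv
      subst hk1; subst hk2
      rw [PySem.Dict.getD_of_mem_items pts hmem (pass1_keys_nodup cells) (0,0)]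
      exact hvv
    · intro hv
      have hcont : cid p ∈ pts.keys := by
        rw [hpts, pass1_mem_keys]; exact ⟨p, hpcell, rfl⟩
      rw [← PySem.Dict.contains_iff_mem_keys] at hcont
      have hget : pts.get? (cid p) = some (pts.getD (cid p) (0,0)) := by
        cases hg : pts.get? (cid p) with
        | none => rw [PySem.Dict.contains_eq_isSome_get?, hg] at hcont; simp at hcont
        | some v => rw [PySem.Dict.getD_of_get?_eq_some pts (0,0) hg]
      have hitem := PySem.Dict.mem_items_of_get?_eq_some pts hget
      simp only [List.any_eq_true, List.mem_map, List.mem_filter]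
      exact ⟨cid p, ⟨(cid p, pts.getD (cid p) (0,0)), ⟨hitem, by simpa using hv⟩, rfl⟩, by simp⟩
  -- membership in B's dead set
  have hmemB : PySem.Set.contains (PySem.Set.diff
      (PySem.Set.ofList (grid.flatMap (fun row => row.map (fun pos => PySem.List.pyGetD pos 0 0))))
      (PySem.Set.ofList (grid.flatMap (fun row =>
        (row.filter (fun pos => PySem.List.pyGetD pos 1 0 ≤ 0)).map
          (fun pos => PySem.List.pyGetD pos 0 0))))) (cid p) = true ↔
      ∀ q ∈ cells, cid q = cid p → 0 < PySem.List.pyGetD q 1 0 := by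
    rw [PySem.Set.contains_iff, PySem.Set.mem_diff, PySem.Set.mem_ofList, PySem.Set.mem_ofList]
    constructor
    · rintro ⟨_, hnu⟩ q hq hcq
      by_contra hneg
      apply hnu
      rw [List.mem_flatMap] at hq ⊢
      obtain ⟨r, hr, hqr⟩ := hq
      exact ⟨r, hr, by
        rw [List.mem_map]
        exact ⟨q, by rw [List.mem_filter]; exact ⟨hqr, by simpa using hneg⟩, hcq⟩⟩
    · intro h
      constructor
      · rw [List.mem_flatMap] at hpcell ⊢
        obtain ⟨r, hr, hpr⟩ := hpcell
        exact ⟨r, hr, List.mem_map.mpr ⟨p, hpr, rfl⟩⟩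
      · intro hmem
        rw [List.mem_flatMap] at hmem
        obtain ⟨r, hr, hmr⟩ := hmem
        rw [List.mem_map] at hmr
        obtain ⟨q, hqf, hcq⟩ := hmr
        rw [List.mem_filter] at hqf
        have := h q (List.mem_flatMap.mpr ⟨r, hr, hqf.1⟩) hcq
        have hle : PySem.List.pyGetD q 1 0 ≤ 0 := by simpa using hqf.2
        omega
  -- the two conditions coincide
  have hcond : (pts.getD (cid p) (0,0)).1 = (pts.getD (cid p) (0,0)).2 ↔
      ∀ q ∈ cells, cid q = cid p → 0 < PySem.List.pyGetD q 1 0 := by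
    rw [hpts, pass1_getD]
    simp only [PySem.Dict.getD_empty]
    simpa using count_eq_iff cells (cid p)
  simp only [cid] at hmemA hmemB hcond ⊢
  by_cases hc : ∀ q ∈ cells, PySem.List.pyGetD q 0 0 = PySem.List.pyGetD p 0 0 → 0 < PySem.List.pyGetD q 1 0
  · rw [if_pos (hmemA.mpr (hcond.mpr hc)), if_pos (hmemB.mpr hc)]
    exact set_eq_splice p hplen
  · rw [if_neg, if_neg]
    · intro h; exact hc (hmemB.mp h)
    · intro h; exact hc (hcond.mp (hmemA.mp h))
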